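-- pv_equiv track=rewrite | github.com/arskn/master_thesis | chapter4/chapter4-algorithm-A11.py | Is_Sequence_Linear_Independent
-- ===== SOURCE A (Python) =====
-- def Create_Arrays_of_Binary_Notation_For_Inputs(n):
--     binary_array = []
--     for i in range (1,2**n):
--         binary_string = bin(i)[2:]
--         bit_array = [int(bit) for bit in binary_string]
--         # set the length of all binary notations to the same length equal to "n"
--         for _ in range(n-len(bit_array)):
--             bit_array.insert(0,0)
--         binary_array.append(bit_array)
--     return(binary_array)
--
-- def Is_Sequence_Linear_Independent(sequence, dimension):
--     combinations_of_coefficients = Create_Arrays_of_Binary_Notation_For_Inputs(dimension)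
--     for combination in combinations_of_coefficients:
--         s = 0
--         for i in range(len(combination)):
--             s = s^(combination[i]*sequence[i])
--         if (s == 0):
--             return(False)
--     return(True)
-- ===== SOURCE B (Python) =====
-- def _tz(x):
--     """Number of trailing zero bits of a nonzero integer."""
--     t = 0
--     while x % 2 == 0:
--         x //= 2
--         t += 1
--     return t
--
-- def Is_Sequence_Linear_Independent(sequence, dimension):
--     # Gaussian elimination over GF(2): keep an xor-basis of pivots with
--     # strictly increasing numbers of trailing zero bits; one ascending pass
--     # fully reduces each new element.
--     basis = []
--     for k in range(dimension):
--         x = sequence[k]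
--         for v in basis:
--             if x != 0 and _tz(x) == _tz(v):
--                 x ^= v
--         if x == 0:
--             return False
--         i = 0
--         while i < len(basis) and _tz(basis[i]) < _tz(x):
--             i += 1
--         basis.insert(i, x)
--     return True
-- ===== Notes on version B (the rewrite author's own statement) =====
-- stated objective: alternative
-- what changed: A tests every one of the 2^n-1 nonzero GF(2) coefficient combinations (built from the binary notations of 1..2^n-1); B runs Gaussian elimination, keeping an xor-basis of pivots with pairwise distinct trailing-zero counts and reducing each element in one ascending pass.
import Mathlib
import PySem

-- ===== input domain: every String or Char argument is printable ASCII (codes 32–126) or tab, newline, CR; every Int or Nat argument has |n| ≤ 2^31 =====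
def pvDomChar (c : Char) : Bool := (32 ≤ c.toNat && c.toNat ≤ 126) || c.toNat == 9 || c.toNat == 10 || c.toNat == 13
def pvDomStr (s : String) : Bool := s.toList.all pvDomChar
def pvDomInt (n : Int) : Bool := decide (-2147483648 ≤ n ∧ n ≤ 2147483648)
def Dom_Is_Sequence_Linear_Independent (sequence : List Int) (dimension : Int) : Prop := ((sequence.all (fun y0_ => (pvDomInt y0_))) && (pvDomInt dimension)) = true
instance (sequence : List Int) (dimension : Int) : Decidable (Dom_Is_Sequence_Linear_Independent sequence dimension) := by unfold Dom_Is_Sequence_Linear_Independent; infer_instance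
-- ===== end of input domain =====

-- B replaces A's exhaustive scan over all 2^n-1 GF(2) coefficient combinations by Gaussian
-- elimination with an xor-basis keyed on trailing-zero counts (objective: a genuinely
-- different algorithm; the exhaustive scan disappears).


-- ===== PORT A =====
-- bin(i)[2:] as a list of 0/1 integers (most significant first); exact for i ≥ 0
-- (A only calls it on i ≥ 1; bin recurses on i // 2 and emits i % 2 last)
def pvBinDigits (m : Nat) : List Int :=
  if m = 0 then [] else pvBinDigits (m / 2) ++ [((m % 2 : Nat) : Int)]
decreasing_by exact Nat.div_lt_self (Nat.pos_of_ne_zero (by assumption)) (by omega)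

-- the padding loop: `for _ in range(k): bit_array.insert(0, 0)`
def pvPad (k : Nat) (bits : List Int) : List Int :=
  (List.range k).foldl (fun acc _ => 0 :: acc) bits

-- 2**dimension: exact for dimension ≥ 0 (Pre_ excludes dimension < 0, where Python raises)
def Create_Arrays_of_Binary_Notation_For_Inputs (n : Int) : List (List Int) :=
  (PySem.List.pyRange 1 ((2 : Int) ^ n.toNat) 1).map (fun i =>
    let bit_array := pvBinDigits i.toNat
    pvPad (n.toNat - bit_array.length) bit_array)

-- s = 0; for i in range(len(combination)): s = s ^ (combination[i]*sequence[i])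
def pvAXor (sequence c : List Int) : Int :=
  (PySem.List.pyRange 0 (PySem.List.len c) 1).foldl
    (fun s i => PySem.Int.bxor s (PySem.List.pyGetD c i 0 * PySem.List.pyGetD sequence i 0)) 0

-- the main loop with its early `return False`
def pvAGo (sequence : List Int) : List (List Int) → Bool
  | [] => true
  | c :: rest => if pvAXor sequence c = 0 then false else pvAGo sequence rest

def Is_Sequence_Linear_Independent (sequence : List Int) (dimension : Int) : Bool :=
  pvAGo sequence (Create_Arrays_of_Binary_Notation_For_Inputs dimension)

-- ===== PORT B =====
-- _tz(x): trailing zero bits; exact for x ≠ 0 (B only applies it to nonzero values)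
def pvTz (x : Int) : Nat :=
  if hx : x = 0 then 0
  else if PySem.Int.mod x 2 = 0 then pvTz (PySem.Int.floordiv x 2) + 1 else 0
termination_by x.natAbs
decreasing_by
  rename_i hm
  have h2 : (2 : Int) ∣ x := (PySem.Int.mod_eq_zero_iff_dvd x 2).mp hm
  obtain ⟨k, rfl⟩ := h2
  rw [PySem.Int.floordiv_eq_ediv_of_pos (by omega), Int.mul_ediv_cancel_left k (by omega)]
  have hk : k ≠ 0 := by rintro rfl; simp at hx
  omega

-- inner pass: for v in basis: if x != 0 and _tz(x) == _tz(v): x ^= v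
def pvReduce (basis : List Int) (x : Int) : Int :=
  basis.foldl (fun x v => if x ≠ 0 ∧ pvTz x = pvTz v then PySem.Int.bxor x v else x) x

-- insertion loop: i = 0; while i < len(basis) and _tz(basis[i]) < _tz(x): i += 1; basis.insert(i, x)
def pvInsert (x : Int) : List Int → List Int
  | [] => [x]
  | v :: r => if pvTz v < pvTz x then v :: pvInsert x r else x :: v :: r

-- for k in range(dimension): x = sequence[k]; …; early `return False`
def pvBGo (sequence : List Int) (basis : List Int) : List Int → Bool
  | [] => true
  | k :: ks =>
    let x := pvReduce basis (PySem.List.pyGetD sequence k 0)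
    if x = 0 then false else pvBGo sequence (pvInsert x basis) ks

def Is_Sequence_Linear_Independent_alt (sequence : List Int) (dimension : Int) : Bool :=
  pvBGo sequence [] (PySem.List.pyRange 0 dimension 1)

-- ===== PRECONDITION & SPEC =====
-- A raises TypeError for dimension < 0 (range over a float) and IndexError when
-- dimension exceeds len(sequence); Pre_ excludes exactly those inputs.
def Pre_Is_Sequence_Linear_Independent (sequence : List Int) (dimension : Int) : Prop :=
  0 ≤ dimension ∧ dimension ≤ (sequence.length : Int)
instance (sequence : List Int) (dimension : Int) : Decidable (Pre_Is_Sequence_Linear_Independent sequence dimension) := by unfold Pre_Is_Sequence_Linear_Independent; infer_instance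

def pvWitness_Is_Sequence_Linear_Independent : List Int × Int := ([1, 2, 3], 2)

def Spec_Is_Sequence_Linear_Independent (sequence : List Int) (dimension : Int) (out : Bool) : Prop := out = Is_Sequence_Linear_Independent_alt sequence dimension
instance (sequence : List Int) (dimension : Int) (out : Bool) : Decidable (Spec_Is_Sequence_Linear_Independent sequence dimension out) := by unfold Spec_Is_Sequence_Linear_Independent; infer_instance

-- ===== CLAIM (what is proved, stated in full; the proofs are below) =====
def Claim_equal_Is_Sequence_Linear_Independent : Prop := ∀ (sequence : List Int) (dimension : Int), Dom_Is_Sequence_Linear_Independent sequence dimension → Pre_Is_Sequence_Linear_Independent sequence dimension → Spec_Is_Sequence_Linear_Independent sequence dimension (Is_Sequence_Linear_Independent sequence dimension)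

-- ===== LEMMAS AND PROOFS =====
-- Layer 1: algebra of Python's integer xor
theorem pv_bxor_eq_xor (a b : Int) : PySem.Int.bxor a b = Int.xor a b := by
  rcases a with m | m <;> rcases b with n | n <;>
    simp [PySem.Int.bxor, Int.xor, Int.negSucc_eq] <;> omega

theorem pv_int_xor_assoc (a b c : Int) : (a.xor b).xor c = a.xor (b.xor c) := by
  rcases a with m | m <;> rcases b with n | n <;> rcases c with p | p <;>
    simp [Int.xor, Nat.xor_assoc]

theorem pv_bxor_assoc (a b c : Int) :
    PySem.Int.bxor (PySem.Int.bxor a b) c = PySem.Int.bxor a (PySem.Int.bxor b c) := by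
  simp [pv_bxor_eq_xor, pv_int_xor_assoc]

theorem pv_zero_bxor (a : Int) : PySem.Int.bxor 0 a = a := by
  rw [PySem.Int.bxor_comm]; exact PySem.Int.bxor_zero a

theorem pv_bxor_left_comm (a b c : Int) :
    PySem.Int.bxor a (PySem.Int.bxor b c) = PySem.Int.bxor b (PySem.Int.bxor a c) := by
  rw [← pv_bxor_assoc, PySem.Int.bxor_comm a b, pv_bxor_assoc]

theorem pv_bxor_cancel_left (a b : Int) : PySem.Int.bxor a (PySem.Int.bxor a b) = b := by
  rw [← pv_bxor_assoc, PySem.Int.bxor_self, pv_zero_bxor]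

theorem pv_bxor_cancel_right (a b : Int) : PySem.Int.bxor (PySem.Int.bxor a b) b = a := by
  rw [pv_bxor_assoc, PySem.Int.bxor_self, PySem.Int.bxor_zero]

theorem pv_bxor_eq_zero_iff (a b : Int) : PySem.Int.bxor a b = 0 ↔ a = b := by
  constructor
  · intro h
    have := congrArg (fun z => PySem.Int.bxor z b) h
    simpa [pv_bxor_cancel_right, pv_zero_bxor] using this
  · rintro rfl; exact PySem.Int.bxor_self a

theorem pv_bxor_shuffle (a b c d : Int) :
    PySem.Int.bxor (PySem.Int.bxor a b) (PySem.Int.bxor c d)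
      = PySem.Int.bxor (PySem.Int.bxor a c) (PySem.Int.bxor b d) := by
  simp only [pv_bxor_assoc]
  rw [pv_bxor_left_comm b c d]

-- Layer 2: parity and halving of xor
theorem pv_xor_nn (m n : Nat) : Int.xor (m : Int) (n : Int) = ((m ^^^ n : Nat) : Int) := rfl
theorem pv_xor_ns (m n : Nat) : Int.xor (m : Int) (Int.negSucc n) = Int.negSucc (m ^^^ n) := rfl
theorem pv_xor_sn (m n : Nat) : Int.xor (Int.negSucc m) (n : Int) = Int.negSucc (m ^^^ n) := rfl
theorem pv_xor_ss (m n : Nat) : Int.xor (Int.negSucc m) (Int.negSucc n) = ((m ^^^ n : Nat) : Int) := rfl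

theorem pv_nat_xor_mod_two (m n : Nat) : (m ^^^ n) % 2 = (m % 2 + n % 2) % 2 := by
  rcases Nat.even_or_odd m with hm | hm <;> rcases Nat.even_or_odd n with hn | hn <;> simp

theorem pv_bxor_emod_two (a b : Int) :
    (PySem.Int.bxor a b) % 2 = if a % 2 = b % 2 then 0 else 1 := by
  rcases a with m | m <;> rcases b with n | n <;> (try simp only [Int.ofNat_eq_natCast]) <;> rw [pv_bxor_eq_xor]
  · rw [pv_xor_nn]; have h := pv_nat_xor_mod_two m n; split <;> omega
  · rw [pv_xor_ns]; simp only [Int.negSucc_eq]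
    have h := pv_nat_xor_mod_two m n; split <;> omega
  · rw [pv_xor_sn]; simp only [Int.negSucc_eq]
    have h := pv_nat_xor_mod_two m n; split <;> omega
  · rw [pv_xor_ss]; simp only [Int.negSucc_eq]
    have h := pv_nat_xor_mod_two m n; split <;> omega

theorem pv_negSucc_ediv_two (k : Nat) : (Int.negSucc k) / 2 = Int.negSucc (k / 2) := by
  simp only [Int.negSucc_eq]; omega

theorem pv_natCast_ediv_two (m : Nat) : ((m : Int)) / 2 = ((m / 2 : Nat) : Int) := by omega

theorem pv_bxor_ediv_two (a b : Int) :
    (PySem.Int.bxor a b) / 2 = PySem.Int.bxor (a / 2) (b / 2) := by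
  rcases a with m | m <;> rcases b with n | n <;> (try simp only [Int.ofNat_eq_natCast]) <;> rw [pv_bxor_eq_xor, pv_bxor_eq_xor]
  · rw [pv_xor_nn, pv_natCast_ediv_two, pv_natCast_ediv_two, pv_natCast_ediv_two,
      pv_xor_nn, Nat.xor_div_two]
  · rw [pv_xor_ns, pv_negSucc_ediv_two, pv_natCast_ediv_two, pv_negSucc_ediv_two,
      pv_xor_ns, Nat.xor_div_two]
  · rw [pv_xor_sn, pv_negSucc_ediv_two, pv_negSucc_ediv_two, pv_natCast_ediv_two,
      pv_xor_sn, Nat.xor_div_two]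
  · rw [pv_xor_ss, pv_natCast_ediv_two, pv_negSucc_ediv_two, pv_negSucc_ediv_two,
      pv_xor_ss, Nat.xor_div_two]
-- Layer 3: trailing-zero counts of nonzero integers
theorem pvTz_odd {x : Int} (h : x % 2 = 1) : pvTz x = 0 := by
  rw [pvTz, dif_neg (by omega : ¬ x = 0), if_neg]
  rw [PySem.Int.mod_eq_emod_of_pos (by omega)]; omega

theorem pvTz_even {x : Int} (hx : x ≠ 0) (h : x % 2 = 0) : pvTz x = pvTz (x / 2) + 1 := by
  rw [pvTz, dif_neg hx, if_pos, PySem.Int.floordiv_eq_ediv_of_pos (by omega)]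
  rw [PySem.Int.mod_eq_emod_of_pos (by omega)]; omega

theorem pv_tz_min (x y : Int) (hx : x ≠ 0) (hy : y ≠ 0) (h : pvTz x ≠ pvTz y) :
    PySem.Int.bxor x y ≠ 0 ∧ pvTz (PySem.Int.bxor x y) = min (pvTz x) (pvTz y) := by
  rcases Int.emod_two_eq x with hx2 | hx2 <;> rcases Int.emod_two_eq y with hy2 | hy2
  · -- both even
    have hx' : x / 2 ≠ 0 := by omega
    have hy' : y / 2 ≠ 0 := by omega
    have htx := pvTz_even hx hx2
    have hty := pvTz_even hy hy2
    have ih := pv_tz_min (x / 2) (y / 2) hx' hy' (by omega)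
    have hdiv : (PySem.Int.bxor x y) / 2 = PySem.Int.bxor (x / 2) (y / 2) :=
      pv_bxor_ediv_two x y
    have hpar : (PySem.Int.bxor x y) % 2 = 0 := by
      rw [pv_bxor_emod_two, if_pos (by omega)]
    have hne : PySem.Int.bxor x y ≠ 0 := by
      intro h0
      exact ih.1 (by rw [← hdiv, h0]; rfl)
    refine ⟨hne, ?_⟩
    rw [pvTz_even hne hpar, hdiv, ih.2, htx, hty]; omega
  · -- x even, y odd
    have hpar : (PySem.Int.bxor x y) % 2 = 1 := by
      rw [pv_bxor_emod_two, if_neg (by omega)]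
    have hne : PySem.Int.bxor x y ≠ 0 := by intro h0; rw [h0] at hpar; norm_num at hpar
    refine ⟨hne, ?_⟩
    rw [pvTz_odd hpar, pvTz_odd hy2]; omega
  · -- x odd, y even
    have hpar : (PySem.Int.bxor x y) % 2 = 1 := by
      rw [pv_bxor_emod_two, if_neg (by omega)]
    have hne : PySem.Int.bxor x y ≠ 0 := by intro h0; rw [h0] at hpar; norm_num at hpar
    refine ⟨hne, ?_⟩
    rw [pvTz_odd hpar, pvTz_odd hx2]; omega
  · -- both odd
    rw [pvTz_odd hx2, pvTz_odd hy2] at h; omega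
termination_by x.natAbs
decreasing_by omega

theorem pv_tz_gt (x y : Int) (hx : x ≠ 0) (hy : y ≠ 0) (h : pvTz x = pvTz y)
    (hne : PySem.Int.bxor x y ≠ 0) : pvTz x < pvTz (PySem.Int.bxor x y) := by
  rcases Int.emod_two_eq x with hx2 | hx2 <;> rcases Int.emod_two_eq y with hy2 | hy2
  · -- both even
    have hx' : x / 2 ≠ 0 := by omega
    have hy' : y / 2 ≠ 0 := by omega
    have hdiv : (PySem.Int.bxor x y) / 2 = PySem.Int.bxor (x / 2) (y / 2) :=
      pv_bxor_ediv_two x y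
    have hpar : (PySem.Int.bxor x y) % 2 = 0 := by
      rw [pv_bxor_emod_two, if_pos (by omega)]
    have hne' : PySem.Int.bxor (x / 2) (y / 2) ≠ 0 := by
      rw [← hdiv]; intro h0; apply hne; omega
    have ih := pv_tz_gt (x / 2) (y / 2) hx' hy'
      (by rw [pvTz_even hx hx2, pvTz_even hy hy2] at h; omega) hne'
    rw [pvTz_even hx hx2, pvTz_even hne hpar, hdiv]; omega
  · rw [pvTz_odd hy2] at h; rw [pvTz_even hx hx2] at h; omega
  · rw [pvTz_odd hx2] at h; rw [pvTz_even hy hy2] at h; omega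
  · -- both odd
    have hpar : (PySem.Int.bxor x y) % 2 = 0 := by
      rw [pv_bxor_emod_two, if_pos (by omega)]
    rw [pvTz_odd hx2, pvTz_even hne hpar]; omega
termination_by x.natAbs
decreasing_by omega
-- Layer 4: GF(2) coefficient masks and the span of a list
def pvIsMask (c : List Int) : Prop := ∀ a ∈ c, a = 0 ∨ a = 1

def pvXorSel : List Int → List Int → Int
  | a :: c, x :: l => PySem.Int.bxor (a * x) (pvXorSel c l)
  | _, _ => 0

def pvInSpan (l : List Int) (y : Int) : Prop :=
  ∃ c, pvIsMask c ∧ c.length = l.length ∧ pvXorSel c l = y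

def pvNZ (l : List Int) : Prop :=
  ∀ c, pvIsMask c → c.length = l.length → (1 : Int) ∈ c → pvXorSel c l ≠ 0

theorem pv_bxor_aba (a b : Int) : PySem.Int.bxor (PySem.Int.bxor a b) a = b := by
  rw [PySem.Int.bxor_comm a b]; exact pv_bxor_cancel_right b a

theorem pv_bxor_a_ba (a b : Int) : PySem.Int.bxor a (PySem.Int.bxor b a) = b := by
  rw [PySem.Int.bxor_comm b a]; exact pv_bxor_cancel_left a b

theorem pvXorSel_nil_right (c : List Int) : pvXorSel c [] = 0 := by
  cases c <;> rfl

theorem pvXorSel_nil_left (l : List Int) : pvXorSel [] l = 0 := by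
  cases l <;> rfl

theorem pvXorSel_zeros (k : Nat) (l : List Int) : pvXorSel (List.replicate k 0) l = 0 := by
  induction k generalizing l with
  | zero => exact pvXorSel_nil_left l
  | succ k ih =>
    cases l with
    | nil => exact pvXorSel_nil_right _
    | cons x l => simp [List.replicate_succ, pvXorSel, ih]

theorem pv_span_zero (l : List Int) : pvInSpan l 0 :=
  ⟨List.replicate l.length 0, fun _ ha => Or.inl (List.eq_of_mem_replicate ha),
    List.length_replicate, pvXorSel_zeros _ _⟩

theorem pv_span_cons (x : Int) (l : List Int) (y : Int) :
    pvInSpan (x :: l) y ↔ pvInSpan l y ∨ pvInSpan l (PySem.Int.bxor y x) := by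
  constructor
  · rintro ⟨c, hm, hlen, hsel⟩
    cases c with
    | nil => simp at hlen
    | cons a c' =>
      simp only [List.length_cons, Nat.add_right_cancel_iff] at hlen
      have hm' : pvIsMask c' := fun b hb => hm b (List.mem_cons_of_mem _ hb)
      rcases hm a List.mem_cons_self with rfl | rfl
      · left
        refine ⟨c', hm', hlen, ?_⟩
        simpa [pvXorSel, pv_zero_bxor] using hsel
      · right
        refine ⟨c', hm', hlen, ?_⟩
        simp only [pvXorSel, one_mul] at hsel
        rw [← hsel, PySem.Int.bxor_comm x _, pv_bxor_cancel_right]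
  · rintro (⟨c, hm, hlen, hsel⟩ | ⟨c, hm, hlen, hsel⟩)
    · exact ⟨0 :: c, fun a ha => (List.mem_cons.mp ha).elim (fun h => Or.inl h) (hm a),
        by simp [hlen], by simp [pvXorSel, pv_zero_bxor, hsel]⟩
    · refine ⟨1 :: c, fun a ha => (List.mem_cons.mp ha).elim (fun h => Or.inr h) (hm a),
        by simp [hlen], ?_⟩
      simp only [pvXorSel, one_mul, hsel]
      exact pv_bxor_a_ba x y

theorem pvXorSel_append {c l : List Int} (d q : List Int) (h : c.length = l.length) :
    pvXorSel (c ++ d) (l ++ q) = PySem.Int.bxor (pvXorSel c l) (pvXorSel d q) := by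
  induction c generalizing l with
  | nil =>
    cases l with
    | nil => simp [pvXorSel_nil_left, pv_zero_bxor]
    | cons _ _ => simp at h
  | cons a c' ih =>
    cases l with
    | nil => simp at h
    | cons x l' =>
      simp only [List.length_cons, Nat.add_right_cancel_iff] at h
      simp only [List.cons_append, pvXorSel, ih h, pv_bxor_assoc]

theorem pv_span_concat (x : Int) (l : List Int) (y : Int) :
    pvInSpan (l ++ [x]) y ↔ pvInSpan l y ∨ pvInSpan l (PySem.Int.bxor y x) := by
  constructor
  · rintro ⟨c, hm, hlen, hsel⟩
    have hne : c ≠ [] := by intro h; subst h; simp at hlen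
    obtain ⟨c', a, rfl⟩ : ∃ c' a, c = c' ++ [a] :=
      ⟨c.dropLast, c.getLast hne, (List.dropLast_append_getLast hne).symm⟩
    have hlen' : c'.length = l.length := by simpa using hlen
    have hm' : pvIsMask c' := fun b hb => hm b (List.mem_append_left _ hb)
    rw [pvXorSel_append _ _ hlen'] at hsel
    have hone : pvXorSel [a] [x] = a * x := by
      simp [pvXorSel, PySem.Int.bxor_zero]
    rw [hone] at hsel
    rcases hm a (List.mem_append_right _ (List.mem_singleton.mpr rfl)) with rfl | rfl
    · left; exact ⟨c', hm', hlen', by simpa [PySem.Int.bxor_zero] using hsel⟩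
    · right
      refine ⟨c', hm', hlen', ?_⟩
      rw [one_mul] at hsel
      rw [← hsel, pv_bxor_cancel_right]
  · rintro (⟨c, hm, hlen, hsel⟩ | ⟨c, hm, hlen, hsel⟩)
    · refine ⟨c ++ [0], ?_, by simp [hlen], ?_⟩
      · intro a ha
        rcases List.mem_append.mp ha with ha | ha
        · exact hm a ha
        · simp at ha; subst ha; exact Or.inl rfl
      · rw [pvXorSel_append _ _ hlen, hsel]
        simp [pvXorSel, PySem.Int.bxor_zero]
    · refine ⟨c ++ [1], ?_, by simp [hlen], ?_⟩
      · intro a ha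
        rcases List.mem_append.mp ha with ha | ha
        · exact hm a ha
        · simp at ha; subst ha; exact Or.inr rfl
      · rw [pvXorSel_append _ _ hlen, hsel]
        simp only [pvXorSel, one_mul, PySem.Int.bxor_zero]
        exact pv_bxor_cancel_right y x

theorem pv_span_closed {l : List Int} {a b : Int}
    (ha : pvInSpan l a) (hb : pvInSpan l b) : pvInSpan l (PySem.Int.bxor a b) := by
  induction l generalizing a b with
  | nil =>
    obtain ⟨c, _, _, hsel⟩ := ha
    obtain ⟨d, _, _, hsel'⟩ := hb
    rw [pvXorSel_nil_right] at hsel hsel'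
    rw [← hsel, ← hsel', PySem.Int.bxor_zero]
    exact pv_span_zero []
  | cons x l ih =>
    rw [pv_span_cons] at ha hb ⊢
    rcases ha with ha | ha <;> rcases hb with hb | hb
    · exact Or.inl (ih ha hb)
    · right
      have := ih ha hb
      rwa [← pv_bxor_assoc] at this
    · right
      have := ih ha hb
      rwa [pv_bxor_assoc, PySem.Int.bxor_comm x _, ← pv_bxor_assoc] at this
    · left
      have := ih ha hb
      rwa [pv_bxor_shuffle, PySem.Int.bxor_self, PySem.Int.bxor_zero] at this

theorem pv_span_xor_iff {l : List Int} {s : Int} (hs : pvInSpan l s) (z : Int) :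
    pvInSpan l (PySem.Int.bxor z s) ↔ pvInSpan l z := by
  constructor
  · intro h
    have := pv_span_closed h hs
    rwa [pv_bxor_assoc, PySem.Int.bxor_self, PySem.Int.bxor_zero] at this
  · intro h
    exact pv_span_closed h hs

theorem pv_span_insert (x : Int) (l : List Int) (y : Int) :
    pvInSpan (pvInsert x l) y ↔ pvInSpan (x :: l) y := by
  induction l generalizing y with
  | nil => exact Iff.rfl
  | cons v r ih =>
    show pvInSpan (if pvTz v < pvTz x then v :: pvInsert x r else x :: v :: r) y ↔ _
    split
    · rw [pv_span_cons, ih, ih, pv_span_cons, pv_span_cons, pv_span_cons, pv_span_cons,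
        pv_span_cons]
      rw [show PySem.Int.bxor (PySem.Int.bxor y v) x = PySem.Int.bxor (PySem.Int.bxor y x) v by
        rw [pv_bxor_assoc, PySem.Int.bxor_comm v x, ← pv_bxor_assoc]]
      tauto
    · exact Iff.rfl

theorem pv_span_head_subst {l : List Int} {s : Int} (hs : pvInSpan l s) (x y : Int) :
    pvInSpan (PySem.Int.bxor x s :: l) y ↔ pvInSpan (x :: l) y := by
  rw [pv_span_cons, pv_span_cons]
  have : PySem.Int.bxor y (PySem.Int.bxor x s)
      = PySem.Int.bxor (PySem.Int.bxor y x) s := (pv_bxor_assoc y x s).symm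
  rw [this, pv_span_xor_iff hs]

theorem pv_span_congr_step {bs p : List Int}
    (h : ∀ y, pvInSpan bs y ↔ pvInSpan p y) (x : Int) :
    ∀ y, pvInSpan (x :: bs) y ↔ pvInSpan (p ++ [x]) y := by
  intro y
  rw [pv_span_cons, pv_span_concat, h, h]
-- Layer 5: properties of the pivot basis
def pvSorted (l : List Int) : Prop := List.Pairwise (fun a b => pvTz a < pvTz b) l

theorem pv_span_nil {z : Int} (h : pvInSpan [] z) : z = 0 := by
  obtain ⟨c, _, _, hsel⟩ := h
  rw [pvXorSel_nil_right] at hsel; omega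

theorem pv_span_tz {l : List Int} (hs : pvSorted l) (hnz : ∀ v ∈ l, v ≠ 0) {z : Int}
    (hz : pvInSpan l z) (h0 : z ≠ 0) : ∃ v ∈ l, pvTz z = pvTz v := by
  induction l generalizing z with
  | nil => exact absurd (pv_span_nil hz) h0
  | cons v r ih =>
    have hs' : pvSorted r := hs.of_cons
    have hv : ∀ w ∈ r, pvTz v < pvTz w := fun w hw => List.rel_of_pairwise_cons hs hw
    have hnz' : ∀ w ∈ r, w ≠ 0 := fun w hw => hnz w (List.mem_cons_of_mem _ hw)
    rcases (pv_span_cons v r z).mp hz with h | h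
    · obtain ⟨w, hw, hzw⟩ := ih hs' hnz' h h0
      exact ⟨w, List.mem_cons_of_mem _ hw, hzw⟩
    · set s := PySem.Int.bxor z v with hsdef
      have hzv : z = PySem.Int.bxor v s := by
        rw [hsdef, pv_bxor_left_comm, PySem.Int.bxor_self, PySem.Int.bxor_zero]
      by_cases hs0 : s = 0
      · exact ⟨v, List.mem_cons_self, by rw [hzv, hs0, PySem.Int.bxor_zero]⟩
      · obtain ⟨w, hw, hsw⟩ := ih hs' hnz' h hs0
        have hvne : pvTz v ≠ pvTz s := by
          have := hv w hw; omega
        have hmin := pv_tz_min v s (hnz v List.mem_cons_self) hs0 hvne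
        refine ⟨v, List.mem_cons_self, ?_⟩
        rw [hzv, hmin.2]
        have := hv w hw; omega

theorem pvReduce_nil (x : Int) : pvReduce [] x = x := rfl

theorem pvReduce_cons (v : Int) (r : List Int) (x : Int) :
    pvReduce (v :: r) x
      = pvReduce r (if x ≠ 0 ∧ pvTz x = pvTz v then PySem.Int.bxor x v else x) := rfl

theorem pvReduce_zero (l : List Int) : pvReduce l 0 = 0 := by
  induction l with
  | nil => rfl
  | cons v r ih => rw [pvReduce_cons, if_neg (by simp)]; exact ih

theorem pvReduce_span (l : List Int) (x : Int) :
    ∃ s, pvInSpan l s ∧ pvReduce l x = PySem.Int.bxor x s := by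
  induction l generalizing x with
  | nil => exact ⟨0, pv_span_zero [], by rw [pvReduce_nil, PySem.Int.bxor_zero]⟩
  | cons v r ih =>
    rw [pvReduce_cons]
    split
    · obtain ⟨s', hs', heq⟩ := ih (PySem.Int.bxor x v)
      refine ⟨PySem.Int.bxor v s', ?_, ?_⟩
      · rw [pv_span_cons]
        right
        rwa [pv_bxor_aba]
      · rw [heq, pv_bxor_assoc]
    · obtain ⟨s', hs', heq⟩ := ih x
      exact ⟨s', (pv_span_cons v r s').mpr (Or.inl hs'), heq⟩

theorem pvReduce_id {l : List Int} {x : Int} (h : ∀ v ∈ l, pvTz x < pvTz v) :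
    pvReduce l x = x := by
  induction l with
  | nil => rfl
  | cons v r ih =>
    rw [pvReduce_cons, if_neg (by
      rintro ⟨-, heq⟩
      exact absurd heq (by have := h v List.mem_cons_self; omega))]
    exact ih fun w hw => h w (List.mem_cons_of_mem _ hw)

theorem pvReduce_tz {l : List Int} (hs : pvSorted l) (hnz : ∀ v ∈ l, v ≠ 0) {x : Int}
    (hr : pvReduce l x ≠ 0) :
    pvTz x ≤ pvTz (pvReduce l x) ∧ ∀ v ∈ l, pvTz (pvReduce l x) ≠ pvTz v := by
  induction l generalizing x with
  | nil => exact ⟨le_rfl, by simp⟩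
  | cons v r ih =>
    have hs' : pvSorted r := hs.of_cons
    have hvr : ∀ w ∈ r, pvTz v < pvTz w := fun w hw => List.rel_of_pairwise_cons hs hw
    have hnz' : ∀ w ∈ r, w ≠ 0 := fun w hw => hnz w (List.mem_cons_of_mem _ hw)
    rw [pvReduce_cons] at hr ⊢
    by_cases hx0 : x = 0
    · subst hx0
      rw [if_neg (by simp), pvReduce_zero] at hr
      exact absurd rfl hr
    by_cases hc : pvTz x = pvTz v
    · rw [if_pos ⟨hx0, hc⟩] at hr ⊢
      set x1 := PySem.Int.bxor x v with hx1
      have hx10 : x1 ≠ 0 := by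
        intro h0; rw [h0, pvReduce_zero] at hr; exact hr rfl
      have hgt : pvTz x < pvTz x1 := pv_tz_gt x v hx0 (hnz v List.mem_cons_self) hc hx10
      obtain ⟨hle, hall⟩ := ih hs' hnz' hr
      refine ⟨by omega, ?_⟩
      intro w hw
      rcases List.mem_cons.mp hw with rfl | hw
      · omega
      · exact hall w hw
    · rw [if_neg (by tauto)] at hr ⊢
      by_cases hlt : pvTz x < pvTz v
      · have hall : ∀ w ∈ v :: r, pvTz x < pvTz w := by
          intro w hw
          rcases List.mem_cons.mp hw with rfl | hw
          · exact hlt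
          · have := hvr w hw; omega
        have hid : pvReduce r x = x := pvReduce_id fun w hw => hall w (List.mem_cons_of_mem _ hw)
        rw [hid]
        exact ⟨le_rfl, fun w hw => by have := hall w hw; omega⟩
      · have hgt : pvTz v < pvTz x := by omega
        obtain ⟨hle, hall⟩ := ih hs' hnz' hr
        refine ⟨hle, ?_⟩
        intro w hw
        rcases List.mem_cons.mp hw with rfl | hw
        · omega
        · exact hall w hw
-- pvInsert keeps the basis strictly sorted by trailing-zero count
theorem pv_mem_insert (y x : Int) (l : List Int) :
    y ∈ pvInsert x l ↔ y = x ∨ y ∈ l := by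
  induction l with
  | nil => simp [pvInsert]
  | cons v r ih =>
    show y ∈ (if pvTz v < pvTz x then v :: pvInsert x r else x :: v :: r) ↔ _
    split
    · simp only [List.mem_cons, ih]; tauto
    · simp only [List.mem_cons]

theorem pv_insert_sorted {l : List Int} {x : Int} (hs : pvSorted l)
    (hne : ∀ v ∈ l, pvTz v ≠ pvTz x) : pvSorted (pvInsert x l) := by
  induction l with
  | nil => simp [pvInsert, pvSorted]
  | cons v r ih =>
    have hs' : pvSorted r := hs.of_cons
    have hvr : ∀ w ∈ r, pvTz v < pvTz w := fun w hw => List.rel_of_pairwise_cons hs hw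
    show pvSorted (if pvTz v < pvTz x then v :: pvInsert x r else x :: v :: r)
    split
    · refine List.Pairwise.cons ?_ (ih hs' fun w hw => hne w (List.mem_cons_of_mem _ hw))
      intro w hw
      rcases (pv_mem_insert w x r).mp hw with rfl | hw
      · assumption
      · exact hvr w hw
    · have hxv : pvTz x < pvTz v := by
        have := hne v List.mem_cons_self; omega
      refine List.Pairwise.cons ?_ hs
      intro w hw
      rcases List.mem_cons.mp hw with rfl | hw
      · exact hxv
      · have := hvr w hw; omega

-- the "no nonzero combination xors to zero" predicate under append
theorem pvNZ_nil : pvNZ [] := by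
  intro c _ hlen h1
  rw [List.length_nil, List.length_eq_zero_iff] at hlen
  subst hlen; simp at h1

theorem pvNZ_concat (l : List Int) (x : Int) :
    pvNZ (l ++ [x]) ↔ pvNZ l ∧ ¬ pvInSpan l x := by
  constructor
  · intro h
    constructor
    · intro c hm hlen h1
      have := h (c ++ [0]) (fun a ha => (List.mem_append.mp ha).elim (hm a)
          (fun ha => by simp at ha; exact Or.inl ha)) (by simp [hlen])
        (List.mem_append_left _ h1)
      rwa [pvXorSel_append _ _ hlen, show pvXorSel [(0:Int)] [x] = 0 by
        simp [pvXorSel], PySem.Int.bxor_zero] at this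
    · rintro ⟨c, hm, hlen, hsel⟩
      have := h (c ++ [1]) (fun a ha => (List.mem_append.mp ha).elim (hm a)
          (fun ha => by simp at ha; exact Or.inr ha)) (by simp [hlen])
        (List.mem_append_right _ (by simp))
      apply this
      rw [pvXorSel_append _ _ hlen, hsel, show pvXorSel [(1:Int)] [x] = x by
        simp [pvXorSel], PySem.Int.bxor_self]
  · rintro ⟨hnz, hns⟩ c hm hlen h1
    have hne : c ≠ [] := by intro h; subst h; simp at hlen
    obtain ⟨c', a, rfl⟩ : ∃ c' a, c = c' ++ [a] :=
      ⟨c.dropLast, c.getLast hne, (List.dropLast_append_getLast hne).symm⟩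
    have hlen' : c'.length = l.length := by simpa using hlen
    have hm' : pvIsMask c' := fun b hb => hm b (List.mem_append_left _ hb)
    rw [pvXorSel_append _ _ hlen']
    rcases hm a (List.mem_append_right _ (by simp)) with rfl | rfl
    · rw [show pvXorSel [(0:Int)] [x] = 0 by simp [pvXorSel], PySem.Int.bxor_zero]
      have h1' : (1 : Int) ∈ c' := by
        rcases List.mem_append.mp h1 with h | h
        · exact h
        · simp at h
      exact hnz c' hm' hlen' h1'
    · rw [show pvXorSel [(1:Int)] [x] = x by simp [pvXorSel]]
      intro h0
      exact hns ⟨c', hm', hlen', by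
        have := (pv_bxor_eq_zero_iff (pvXorSel c' l) x).mp h0; omega⟩

theorem pvNZ_append_not {l : List Int} (q : List Int) (h : ¬ pvNZ l) : ¬ pvNZ (l ++ q) := by
  intro hq
  apply h
  intro c hm hlen h1
  have := hq (c ++ List.replicate q.length 0)
    (fun a ha => (List.mem_append.mp ha).elim (hm a)
      (fun ha => Or.inl (List.eq_of_mem_replicate ha)))
    (by simp [hlen]) (List.mem_append_left _ h1)
  rwa [pvXorSel_append _ _ hlen, pvXorSel_zeros, PySem.Int.bxor_zero] at this

-- Layer 7: the elimination loop decides pvNZ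
def pvBGoV (basis : List Int) : List Int → Bool
  | [] => true
  | x :: xs =>
    let r := pvReduce basis x
    if r = 0 then false else pvBGoV (pvInsert r basis) xs

theorem pvBGoV_iff (xs : List Int) : ∀ (basis pref : List Int), pvSorted basis →
    (∀ v ∈ basis, v ≠ 0) → (∀ y, pvInSpan basis y ↔ pvInSpan pref y) → pvNZ pref →
    (pvBGoV basis xs = true ↔ pvNZ (pref ++ xs)) := by
  induction xs with
  | nil => intro basis pref _ _ _ hnzp; simpa [pvBGoV] using hnzp
  | cons x xs ih =>
    intro basis pref hs hnz hspan hnzp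
    show (if pvReduce basis x = 0 then false else pvBGoV (pvInsert (pvReduce basis x) basis) xs)
        = true ↔ _
    obtain ⟨s, hsspan, hred⟩ := pvReduce_span basis x
    by_cases hr : pvReduce basis x = 0
    · rw [if_pos hr]
      have hxspan : pvInSpan pref x := by
        rw [← hspan]
        rw [hr] at hred
        rw [(pv_bxor_eq_zero_iff x s).mp hred.symm]
        exact hsspan
      have hnot : ¬ pvNZ (pref ++ x :: xs) := by
        rw [show pref ++ x :: xs = (pref ++ [x]) ++ xs by simp]
        apply pvNZ_append_not
        rw [pvNZ_concat]
        rintro ⟨-, hni⟩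
        exact hni hxspan
      simp only [Bool.false_eq_true, false_iff]
      exact hnot
    · rw [if_neg hr]
      obtain ⟨hle, hall⟩ := pvReduce_tz hs hnz hr
      have hxnot : ¬ pvInSpan pref x := by
        intro hx
        have hxb : pvInSpan basis x := (hspan x).mpr hx
        have hrb : pvInSpan basis (pvReduce basis x) := by
          rw [hred]; exact pv_span_closed hxb hsspan
        obtain ⟨v, hv, htz⟩ := pv_span_tz hs hnz hrb hr
        exact hall v hv htz
      have hnzp' : pvNZ (pref ++ [x]) := (pvNZ_concat _ _).mpr ⟨hnzp, hxnot⟩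
      have hsorted' : pvSorted (pvInsert (pvReduce basis x) basis) :=
        pv_insert_sorted hs fun v hv => (hall v hv).symm
      have hnz' : ∀ v ∈ pvInsert (pvReduce basis x) basis, v ≠ 0 := by
        intro v hv
        rcases (pv_mem_insert v _ basis).mp hv with rfl | hv
        · exact hr
        · exact hnz v hv
      have hspan' : ∀ y, pvInSpan (pvInsert (pvReduce basis x) basis) y ↔
          pvInSpan (pref ++ [x]) y := by
        intro y
        rw [pv_span_insert, hred, pv_span_head_subst hsspan, pv_span_congr_step hspan]
      have := ih (pvInsert (pvReduce basis x) basis) (pref ++ [x]) hsorted' hnz' hspan' hnzp'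
      rwa [show (pref ++ [x]) ++ xs = pref ++ x :: xs by simp] at this
-- Layer 8: bin(i) digit lists are exactly the nonzero masks
theorem pvBinDigits_zero : pvBinDigits 0 = [] := by rw [pvBinDigits]; rfl

theorem pvBinDigits_succ {v : Nat} (h : v ≠ 0) :
    pvBinDigits v = pvBinDigits (v / 2) ++ [((v % 2 : Nat) : Int)] := by
  rw [pvBinDigits, if_neg h]

theorem pvBinDigits_mask (v : Nat) : pvIsMask (pvBinDigits v) := by
  by_cases h : v = 0
  · subst h; rw [pvBinDigits_zero]; intro a ha; simp at ha
  · rw [pvBinDigits_succ h]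
    intro a ha
    rcases List.mem_append.mp ha with ha | ha
    · exact pvBinDigits_mask (v / 2) a ha
    · simp at ha; subst ha; omega
termination_by v
decreasing_by exact Nat.div_lt_self (Nat.pos_of_ne_zero (by assumption)) (by omega)

theorem pvBinDigits_len {v k : Nat} (h : v < 2 ^ k) : (pvBinDigits v).length ≤ k := by
  by_cases h0 : v = 0
  · subst h0; rw [pvBinDigits_zero]; simp
  · have hk : k ≠ 0 := by
      rintro rfl; simp at h; omega
    rw [pvBinDigits_succ h0, List.length_append]
    have h2 : (2 : Nat) ^ (k - 1) * 2 = 2 ^ k := by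
      rw [← pow_succ]; congr 1; omega
    have := pvBinDigits_len (v := v / 2) (k := k - 1) (by omega)
    simp only [List.length_cons, List.length_nil]
    omega
termination_by v
decreasing_by exact Nat.div_lt_self (Nat.pos_of_ne_zero (by assumption)) (by omega)

theorem pvBinDigits_one_mem {v : Nat} (h : 1 ≤ v) : (1 : Int) ∈ pvBinDigits v := by
  rw [pvBinDigits_succ (by omega)]
  rcases Nat.even_or_odd v with he | ho
  · have he2 : v % 2 = 0 := Nat.even_iff.mp he
    apply List.mem_append_left
    exact pvBinDigits_one_mem (v := v / 2) (by omega)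
  · apply List.mem_append_right
    have : v % 2 = 1 := Nat.odd_iff.mp ho
    simp [this]
termination_by v
decreasing_by omega

theorem pvPad_eq (k : Nat) (bits : List Int) : pvPad k bits = List.replicate k 0 ++ bits := by
  induction k with
  | zero => rfl
  | succ k ih =>
    rw [pvPad, List.range_succ, List.foldl_append]
    show 0 :: pvPad k bits = _
    rw [ih, List.replicate_succ]
    rfl

def pvVal (c : List Int) : Nat := c.foldl (fun a x => 2 * a + x.toNat) 0

theorem pvVal_concat (c : List Int) (a : Int) : pvVal (c ++ [a]) = 2 * pvVal c + a.toNat := by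
  show List.foldl _ 0 (c ++ [a]) = _
  rw [List.foldl_append]
  rfl

theorem pvVal_bits (v : Nat) : pvVal (pvBinDigits v) = v := by
  by_cases h : v = 0
  · subst h; rw [pvBinDigits_zero]; rfl
  · rw [pvBinDigits_succ h, pvVal_concat, pvVal_bits (v / 2)]
    simp; omega
termination_by v
decreasing_by exact Nat.div_lt_self (Nat.pos_of_ne_zero (by assumption)) (by omega)

theorem pvVal_lt {c : List Int} (hm : pvIsMask c) : pvVal c < 2 ^ c.length := by
  induction c using List.reverseRecOn with
  | nil => simp [pvVal]
  | append_singleton c a ih =>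
    rw [pvVal_concat]
    have ha : a = 0 ∨ a = 1 := hm a (List.mem_append_right _ (by simp))
    have hc := ih fun b hb => hm b (List.mem_append_left _ hb)
    have : a.toNat ≤ 1 := by rcases ha with rfl | rfl <;> simp
    simp only [List.length_append, List.length_cons, List.length_nil, pow_succ]
    omega

theorem pvVal_zero_repl {c : List Int} (hm : pvIsMask c) (h : pvVal c = 0) :
    c = List.replicate c.length 0 := by
  induction c using List.reverseRecOn with
  | nil => rfl
  | append_singleton c a ih =>
    rw [pvVal_concat] at h
    have ha : a = 0 ∨ a = 1 := hm a (List.mem_append_right _ (by simp))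
    have ha0 : a = 0 := by rcases ha with rfl | rfl; rfl; simp at h
    subst ha0
    have hc := ih (fun b hb => hm b (List.mem_append_left _ hb)) (by omega)
    simp only [List.length_append, List.length_cons, List.length_nil, Nat.zero_add]
    rw [List.replicate_succ', ← hc]

theorem pvVal_pos {c : List Int} (hm : pvIsMask c) (h1 : (1 : Int) ∈ c) : 1 ≤ pvVal c := by
  by_contra h
  have h0 : pvVal c = 0 := by omega
  have := pvVal_zero_repl hm h0
  rw [this] at h1
  have := List.eq_of_mem_replicate h1
  omega

theorem pv_mask_roundtrip {c : List Int} (hm : pvIsMask c) :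
    List.replicate (c.length - (pvBinDigits (pvVal c)).length) 0 ++ pvBinDigits (pvVal c)
      = c := by
  induction c using List.reverseRecOn with
  | nil => simp [pvVal, pvBinDigits_zero]
  | append_singleton c a ih =>
    have hm' : pvIsMask c := fun b hb => hm b (List.mem_append_left _ hb)
    have ha : a = 0 ∨ a = 1 := hm a (List.mem_append_right _ (by simp))
    rw [pvVal_concat]
    by_cases hv : 2 * pvVal c + a.toNat = 0
    · have hc0 : pvVal c = 0 := by omega
      have ha0 : a = 0 := by rcases ha with rfl | rfl; rfl; simp at hv
      subst ha0
      rw [hv, pvBinDigits_zero, List.append_nil]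
      have hrep := pvVal_zero_repl hm' hc0
      simp only [List.length_append, List.length_cons, List.length_nil, List.length_nil,
        Nat.zero_add, Nat.sub_zero]
      rw [List.replicate_succ', ← hrep]
    · rw [pvBinDigits_succ hv]
      have hdiv : (2 * pvVal c + a.toNat) / 2 = pvVal c := by
        have : a.toNat ≤ 1 := by rcases ha with rfl | rfl <;> simp
        omega
      have hmod : ((2 * pvVal c + a.toNat) % 2 : Nat) = a.toNat := by
        have : a.toNat ≤ 1 := by rcases ha with rfl | rfl <;> simp
        omega
      rw [hdiv, hmod]
      have hcast : ((a.toNat : Nat) : Int) = a := by rcases ha with rfl | rfl <;> rfl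
      rw [hcast]
      rw [List.length_append, List.length_append, List.length_cons, List.length_nil]
      have hlb : (pvBinDigits (pvVal c)).length ≤ c.length := pvBinDigits_len (pvVal_lt hm')
      rw [show c.length + 1 - ((pvBinDigits (pvVal c)).length + 1)
          = c.length - (pvBinDigits (pvVal c)).length from by omega]
      rw [← List.append_assoc, ih hm']
-- bridging A's fold to pvXorSel
theorem pvAGo_iff (seq : List Int) (cs : List (List Int)) :
    pvAGo seq cs = true ↔ ∀ c ∈ cs, pvAXor seq c ≠ 0 := by
  induction cs with
  | nil => simp [pvAGo]
  | cons c rest ih =>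
    show (if pvAXor seq c = 0 then false else pvAGo seq rest) = true ↔ _
    split
    · simp_all
    · simp_all

theorem pv_foldl_bxor_acc (g : Nat → Int) (r : List Nat) : ∀ acc : Int,
    r.foldl (fun s k => PySem.Int.bxor s (g k)) acc
      = PySem.Int.bxor acc (r.foldl (fun s k => PySem.Int.bxor s (g k)) 0) := by
  induction r with
  | nil => intro acc; simp [PySem.Int.bxor_zero]
  | cons k r' ih =>
    intro acc
    rw [List.foldl_cons, List.foldl_cons, ih (PySem.Int.bxor acc (g k)),
      ih (PySem.Int.bxor 0 (g k)), pv_zero_bxor, pv_bxor_assoc]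

theorem pv_fold_sel (c : List Int) : ∀ seq : List Int, c.length ≤ seq.length →
    (List.range c.length).foldl
      (fun s k => PySem.Int.bxor s (c.getD k 0 * seq.getD k 0)) 0 = pvXorSel c seq := by
  induction c with
  | nil => intro seq _; rw [List.length_nil, List.range_zero, List.foldl_nil, pvXorSel_nil_left]
  | cons a c' ih =>
    intro seq hlen
    cases seq with
    | nil => simp at hlen
    | cons y seq' =>
      rw [List.length_cons, List.range_succ_eq_map, List.foldl_cons, List.foldl_map]
      simp only [List.getD_cons_succ, List.getD_cons_zero]
      rw [pv_foldl_bxor_acc, pv_zero_bxor]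
      show PySem.Int.bxor (a * y) ((List.range c'.length).foldl
        (fun s k => PySem.Int.bxor s (c'.getD k 0 * seq'.getD k 0)) 0) = _
      rw [ih seq' (by simpa using hlen)]
      rfl

theorem pvAXor_eq {seq c : List Int} (h : c.length ≤ seq.length) :
    pvAXor seq c = pvXorSel c seq := by
  rw [pvAXor, PySem.List.len_eq, PySem.List.pyRange_zero_natCast, List.foldl_map]
  simp only [PySem.List.pyGetD_natCast]
  exact pv_fold_sel c seq h

theorem pvXorSel_take (c : List Int) : ∀ (l : List Int) (k : Nat), c.length ≤ k →
    pvXorSel c (l.take k) = pvXorSel c l := by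
  induction c with
  | nil => intro l k _; rw [pvXorSel_nil_left, pvXorSel_nil_left]
  | cons a c' ih =>
    intro l k hk
    cases l with
    | nil => simp
    | cons y l' =>
      cases k with
      | zero => simp at hk
      | succ k' =>
        rw [List.take_succ_cons]
        show PySem.Int.bxor (a * y) (pvXorSel c' (l'.take k'))
          = PySem.Int.bxor (a * y) (pvXorSel c' l')
        rw [ih l' k' (by simpa using hk)]

-- characterization of port A
theorem pvA_iff (seq : List Int) (dim : Int) (hd : 0 ≤ dim) (hl : dim ≤ (seq.length : Int)) :
    Is_Sequence_Linear_Independent seq dim = true ↔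
      ∀ c, pvIsMask c → c.length = dim.toNat → (1 : Int) ∈ c → pvXorSel c seq ≠ 0 := by
  have hnl : dim.toNat ≤ seq.length := by omega
  rw [Is_Sequence_Linear_Independent, pvAGo_iff]
  rw [Create_Arrays_of_Binary_Notation_For_Inputs]
  constructor
  · intro h c hm hlen h1
    have hvlt : pvVal c < 2 ^ dim.toNat := by rw [← hlen]; exact pvVal_lt hm
    have hvpos : 1 ≤ pvVal c := pvVal_pos hm h1
    have hmem : ((pvVal c : Nat) : Int) ∈ PySem.List.pyRange 1 ((2 : Int) ^ dim.toNat) 1 := by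
      rw [PySem.List.mem_pyRange_one]
      refine ⟨by exact_mod_cast hvpos, ?_⟩
      have : ((pvVal c : Nat) : Int) < ((2 ^ dim.toNat : Nat) : Int) := by exact_mod_cast hvlt
      simpa [Nat.cast_pow] using this
    have hA := h _ (List.mem_map_of_mem hmem)
    simp only [Int.toNat_natCast] at hA
    rw [pvPad_eq, show dim.toNat = c.length from hlen.symm, pv_mask_roundtrip hm,
      pvAXor_eq (by omega)] at hA
    exact hA
  · intro h combo hcombo
    obtain ⟨i, hi, rfl⟩ := List.mem_map.mp hcombo
    rw [PySem.List.mem_pyRange_one] at hi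
    have hv1 : 1 ≤ i.toNat := by omega
    have hvlt : i.toNat < 2 ^ dim.toNat := by
      have h2 : i < ((2 ^ dim.toNat : Nat) : Int) := by
        have := hi.2; simpa [Nat.cast_pow] using this
      omega
    show pvAXor seq (pvPad (dim.toNat - (pvBinDigits i.toNat).length) (pvBinDigits i.toNat)) ≠ 0
    rw [pvPad_eq]
    have hm : pvIsMask (List.replicate (dim.toNat - (pvBinDigits i.toNat).length) 0
        ++ pvBinDigits i.toNat) := by
      intro a ha
      rcases List.mem_append.mp ha with ha | ha
      · exact Or.inl (List.eq_of_mem_replicate ha)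
      · exact pvBinDigits_mask i.toNat a ha
    have hlb : (pvBinDigits i.toNat).length ≤ dim.toNat := pvBinDigits_len hvlt
    have hlen : (List.replicate (dim.toNat - (pvBinDigits i.toNat).length) 0
        ++ pvBinDigits i.toNat).length = dim.toNat := by
      rw [List.length_append, List.length_replicate]; omega
    have h1 : (1 : Int) ∈ List.replicate (dim.toNat - (pvBinDigits i.toNat).length) 0
        ++ pvBinDigits i.toNat := List.mem_append_right _ (pvBinDigits_one_mem hv1)
    rw [pvAXor_eq (by omega)]
    exact h _ hm hlen h1

-- characterization of port B
theorem pv_map_getD_range (l : List Int) (n : Nat) (h : n ≤ l.length) :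
    (List.range n).map (fun k => l.getD k 0) = l.take n := by
  apply List.ext_getElem
  · simp [h]
  · intro i h1 h2
    have hi : i < l.length := by simp at h1; omega
    simp only [List.getElem_map, List.getElem_range, List.getElem_take]
    exact List.getD_eq_getElem _ _ hi

theorem pvBGo_eq (seq : List Int) (ks : List Int) : ∀ basis : List Int,
    pvBGo seq basis ks = pvBGoV basis (ks.map (fun k => PySem.List.pyGetD seq k 0)) := by
  induction ks with
  | nil => intro basis; rfl
  | cons k ks ih =>
    intro basis
    show (if pvReduce basis (PySem.List.pyGetD seq k 0) = 0 then false else _) = _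
    rw [List.map_cons]
    show _ = (if pvReduce basis (PySem.List.pyGetD seq k 0) = 0 then false else _)
    split
    · rfl
    · exact ih _

theorem pvB_iff (seq : List Int) (dim : Int) (hd : 0 ≤ dim) (hl : dim ≤ (seq.length : Int)) :
    Is_Sequence_Linear_Independent_alt seq dim = true ↔ pvNZ (seq.take dim.toNat) := by
  set n := dim.toNat with hn
  have hdim : dim = (n : Int) := by omega
  rw [Is_Sequence_Linear_Independent_alt, pvBGo_eq, hdim, PySem.List.pyRange_zero_natCast,
    List.map_map]
  have hmap : (List.range n).map ((fun k => PySem.List.pyGetD seq k 0) ∘ (fun k : Nat => (k : Int)))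
      = seq.take n := by
    rw [show ((fun k => PySem.List.pyGetD seq k 0) ∘ (fun k : Nat => (k : Int)))
        = fun k : Nat => seq.getD k 0 from funext fun k => by
      simp [Function.comp, PySem.List.pyGetD_natCast]]
    exact pv_map_getD_range seq n (by omega)
  rw [hmap]
  have := pvBGoV_iff (seq.take n) [] [] List.Pairwise.nil (by simp) (fun y => Iff.rfl) pvNZ_nil
  rwa [List.nil_append] at this

-- ===== VERDICT (by name: the statement is the Claim_ definition above) =====
theorem Is_Sequence_Linear_Independent_spec : Claim_equal_Is_Sequence_Linear_Independent := by
  intro seq dim _ hpre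
  obtain ⟨hd, hl⟩ := hpre
  unfold Spec_Is_Sequence_Linear_Independent
  rw [Bool.eq_iff_iff, pvA_iff seq dim hd hl, pvB_iff seq dim hd hl]
  have hlen : (seq.take dim.toNat).length = dim.toNat := by
    rw [List.length_take]; omega
  constructor
  · intro h c hm hclen h1
    rw [hlen] at hclen
    rw [pvXorSel_take c seq dim.toNat (by omega)]
    exact h c hm hclen h1
  · intro h c hm hclen h1
    have := h c hm (by rw [hlen]; exact hclen) h1
    rwa [pvXorSel_take c seq dim.toNat (by omega)] at this
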